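-- pv_equiv track=rewrite | github.com/ArthurTelles-hub/PassVrf | src/patterns.py | possui_sequencia
-- ===== SOURCE A (Python) =====
-- LIMITE_PADRAO = 3
--
-- def possui_sequencia(senha):
--     count = 1
--     for i in range(len(senha) - 1):
--         if ord(senha[i+1]) - ord(senha[i]) == 1:
--             count += 1
--             if count >= LIMITE_PADRAO:
--                 return True
--         else:
--             count = 1
--     return False
-- ===== SOURCE B (Python) =====
-- def possui_sequencia(senha):
--     return any(
--         ord(b) - ord(a) == 1 and ord(c) - ord(b) == 1
--         for a, b, c in zip(senha, senha[1:], senha[2:])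
--     )
-- ===== Notes on version B (the rewrite author's own statement) =====
-- stated objective: simpler
-- what changed: Replaces the resetting run-length counter loop with a stateless any() over length-3 windows (zip of the string with its two shifts), testing each triple directly.
import Mathlib
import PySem

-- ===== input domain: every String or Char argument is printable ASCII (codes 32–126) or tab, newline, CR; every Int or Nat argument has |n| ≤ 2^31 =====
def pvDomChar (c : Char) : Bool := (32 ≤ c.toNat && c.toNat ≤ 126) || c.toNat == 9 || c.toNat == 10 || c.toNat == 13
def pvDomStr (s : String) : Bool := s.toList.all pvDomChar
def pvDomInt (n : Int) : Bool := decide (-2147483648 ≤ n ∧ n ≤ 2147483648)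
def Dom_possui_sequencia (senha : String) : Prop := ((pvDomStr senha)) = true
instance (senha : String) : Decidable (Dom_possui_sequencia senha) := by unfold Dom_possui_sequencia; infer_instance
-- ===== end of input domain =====

-- B replaces A's resetting run-length counter with a stateless any() over length-3 windows (simpler).

-- ===== PORT A =====
-- A's loop over i in range(len-1) walks adjacent pairs carrying the counter `count`;
-- `return True` is the `true` branch, falling off the loop yields `false`.
def pvAGo : List Char → Int → Bool
  | c1 :: c2 :: rest, count =>
      if (c2.toNat : Int) - (c1.toNat : Int) = 1 then
        if count + 1 ≥ 3 then true else pvAGo (c2 :: rest) (count + 1)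
      else pvAGo (c2 :: rest) 1
  | _, _ => false

def possui_sequencia (senha : String) : Bool :=
  pvAGo senha.toList 1

-- ===== PORT B =====
-- Source B: any over zip(senha, senha[1:], senha[2:]) of the stateless window test.
def possui_sequencia_alt (senha : String) : Bool :=
  let cs := senha.toList
  ((cs.zip (cs.drop 1)).zip (cs.drop 2)).any fun t =>
    decide ((t.1.2.toNat : Int) - (t.1.1.toNat : Int) = 1 ∧
            (t.2.toNat : Int) - (t.1.2.toNat : Int) = 1)

-- ===== PRECONDITION & SPEC =====
def Spec_possui_sequencia (senha : String) (out : Bool) : Prop := out = possui_sequencia_alt senha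
instance (senha : String) (out : Bool) : Decidable (Spec_possui_sequencia senha out) := by unfold Spec_possui_sequencia; infer_instance

-- ===== CLAIM (what is proved, stated in full; the proofs are below) =====
def Claim_equal_possui_sequencia : Prop := ∀ (senha : String), Dom_possui_sequencia senha → Spec_possui_sequencia senha (possui_sequencia senha)

-- ===== LEMMAS AND PROOFS =====

-- B's triple-window test over a char list, written as a predicate for the induction.
def pvT (cs : List Char) : Bool :=
  ((cs.zip (cs.drop 1)).zip (cs.drop 2)).any fun t =>
    decide ((t.1.2.toNat : Int) - (t.1.1.toNat : Int) = 1 ∧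
            (t.2.toNat : Int) - (t.1.2.toNat : Int) = 1)

-- whether the first adjacent pair is a +1 step
def pvFS : List Char → Bool
  | a :: b :: _ => decide ((b.toNat : Int) - (a.toNat : Int) = 1)
  | _ => false

lemma pvT_cons (a b : Char) (rest : List Char) :
    pvT (a :: b :: rest) =
      ((decide ((b.toNat : Int) - (a.toNat : Int) = 1) && pvFS (b :: rest)) || pvT (b :: rest)) := by
  cases rest with
  | nil => simp [pvT, pvFS]
  | cons c rest' => simp [pvT, pvFS, Bool.and_comm, Bool.decide_and]

lemma pvAGo_main : ∀ cs : List Char,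
    (pvAGo cs 1 = pvT cs) ∧ (pvAGo cs 2 = (pvFS cs || pvT cs)) := by
  intro cs
  induction cs with
  | nil => constructor <;> simp [pvAGo, pvT, pvFS]
  | cons a tail ih =>
    cases tail with
    | nil => constructor <;> simp [pvAGo, pvT, pvFS]
    | cons b rest =>
      obtain ⟨ih1, ih2⟩ := ih
      constructor
      · show pvAGo (a :: b :: rest) 1 = _
        rw [pvAGo, pvT_cons]
        by_cases h : (b.toNat : Int) - (a.toNat : Int) = 1
        · simp [h, ih2]
        · simp [h, ih1]
      · show pvAGo (a :: b :: rest) 2 = _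
        rw [pvAGo, pvT_cons]
        by_cases h : (b.toNat : Int) - (a.toNat : Int) = 1
        · simp [pvFS, h]
        · simp [pvFS, h, ih1]

-- ===== VERDICT (by name: the statement is the Claim_ definition above) =====
theorem possui_sequencia_spec : Claim_equal_possui_sequencia := by
  intro senha _
  show possui_sequencia senha = possui_sequencia_alt senha
  have h := (pvAGo_main senha.toList).1
  simpa [possui_sequencia, possui_sequencia_alt, pvT] using h
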